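-- pv_equiv track=rewrite | github.com/Vftdan/texfmtbot | bot.py | nohtml
-- ===== SOURCE A (Python) =====
-- def nohtml(html):
--     ents = {'lt': '<', 'gt': '>', 'amp': '&', 'quot': '"'}
--     mode_ent = False
--     mode_tag = False
--     res = []
--     ent = ''
--     for c in html:
--         if mode_tag:
--             if c == '>':
--                 mode_tag = False
--             continue
--         if mode_ent:
--             if c == ';':
--                 mode_ent = False
--                 res.append(ents.get(ent, '&{0};'.format(ent)))
--                 ent = ''
--                 continue
--             ent += c
--             continue
--         if c == '&':
--             mode_ent = True
--             continue
--         if c == '<':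
--             mode_tag = True
--             continue
--         res.append(c)
--     return ''.join(res)
-- ===== SOURCE B (Python) =====
-- def nohtml(html):
--     # Consume the string through one shared iterator: nested loops eat a whole entity or tag in one go, so no mode flags are needed.
--     ents = {'lt': '<', 'gt': '>', 'amp': '&', 'quot': '"'}
--     out = []
--     it = iter(html)
--     for c in it:
--         if c == '&':
--             name = []
--             for d in it:
--                 if d == ';':
--                     break
--                 name.append(d)
--             else:
--                 break  # unterminated entity: rest is dropped
--             name = ''.join(name)
--             out.append(ents.get(name, '&%s;' % name))
--         elif c == '<':
--             for d in it:
--                 if d == '>':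
--                     break
--             else:
--                 break  # unterminated tag: rest is dropped
--         else:
--             out.append(c)
--     return ''.join(out)
-- ===== Notes on version B (the rewrite author's own statement) =====
-- stated objective: alternative
-- what changed: Replaces A's per-character state machine with mode_ent/mode_tag flags and a pending-entity buffer by nested loops over one shared character iterator that consume a whole entity or tag in a single inner pass, using for-else to drop an unterminated trailing entity/tag.
import Mathlib
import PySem

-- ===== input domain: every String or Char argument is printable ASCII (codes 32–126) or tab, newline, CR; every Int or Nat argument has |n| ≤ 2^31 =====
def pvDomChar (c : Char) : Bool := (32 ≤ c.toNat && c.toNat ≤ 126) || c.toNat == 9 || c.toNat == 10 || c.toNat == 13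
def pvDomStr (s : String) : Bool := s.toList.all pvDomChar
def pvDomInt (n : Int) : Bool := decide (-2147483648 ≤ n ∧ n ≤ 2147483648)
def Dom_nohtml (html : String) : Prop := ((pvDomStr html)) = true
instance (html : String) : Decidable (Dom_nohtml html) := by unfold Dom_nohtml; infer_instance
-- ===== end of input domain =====

-- B replaces A's per-character mode-flag state machine by nested consumption of a shared
-- character stream (an entity/tag is eaten whole by an inner loop); objective: alternative, same O(n) cost.

-- ===== PORT A =====
-- ents = {'lt': '<', 'gt': '>', 'amp': '&', 'quot': '"'}   (strings as lists of chars)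
def aEnts : PySem.Dict (List Char) (List Char) :=
  PySem.Dict.ofList [("lt".toList, "<".toList), ("gt".toList, ">".toList),
                     ("amp".toList, "&".toList), ("quot".toList, "\"".toList)]

-- ents.get(ent, '&{0};'.format(ent))
def aEntGet (ent : List Char) : List Char := (aEnts.get? ent).getD ('&' :: (ent ++ [';']))

-- the body of A's for-loop: state (mode_ent, mode_tag, res, ent)
def aStep (st : Bool × Bool × List (List Char) × List Char) (c : Char) :
    Bool × Bool × List (List Char) × List Char :=
  let (mode_ent, mode_tag, res, ent) := st
  if mode_tag then
    (if c = '>' then (mode_ent, false, res, ent) else (mode_ent, mode_tag, res, ent))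
  else if mode_ent then
    (if c = ';' then (false, mode_tag, res ++ [aEntGet ent], [])
     else (mode_ent, mode_tag, res, ent ++ [c]))
  else if c = '&' then (true, mode_tag, res, ent)
  else if c = '<' then (mode_ent, true, res, ent)
  else (mode_ent, mode_tag, res ++ [[c]], ent)

-- ''.join(res) after the fold over html
def nohtml (html : String) : String :=
  String.mk ((html.toList.foldl aStep (false, false, [], [])).2.2.1.flatten)

-- ===== PORT B =====
def bEnts : PySem.Dict (List Char) (List Char) :=
  PySem.Dict.ofList [("lt".toList, "<".toList), ("gt".toList, ">".toList),
                     ("amp".toList, "&".toList), ("quot".toList, "\"".toList)]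

-- ents.get(name, '&%s;' % name)
def bEntGet (name : List Char) : List Char := (bEnts.get? name).getD ('&' :: (name ++ [';']))

-- inner loop 'for d in it: if d == ';': break; name.append(d)' — returns the collected
-- name and the rest of the iterator (none = iterator exhausted, the for-else case)
def bEntLoop : List Char → List Char × Option (List Char)
  | [] => ([], none)
  | d :: rest =>
    if d = ';' then ([], some rest)
    else
      let p := bEntLoop rest
      (d :: p.1, p.2)

-- inner loop 'for d in it: if d == '>': break'
def bTagLoop : List Char → Option (List Char)
  | [] => none
  | d :: rest => if d = '>' then some rest else bTagLoop rest

theorem bEntLoop_len : ∀ (l n t : List Char), bEntLoop l = (n, some t) → t.length < l.length := by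
  intro l
  induction l with
  | nil => intro n t h; simp [bEntLoop] at h
  | cons d rest ih =>
    intro n t h
    by_cases hd : d = ';'
    · simp [bEntLoop, hd] at h
      simp [← h.2]
    · simp [bEntLoop, hd] at h
      rcases h with ⟨_, h2⟩
      have := ih (bEntLoop rest).1 t (by rw [← h2])
      simp; omega

theorem bTagLoop_len : ∀ (l t : List Char), bTagLoop l = some t → t.length < l.length := by
  intro l
  induction l with
  | nil => intro t h; simp [bTagLoop] at h
  | cons d rest ih =>
    intro t h
    by_cases hd : d = '>'
    · simp [bTagLoop, hd] at h
      simp [← h]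
    · simp [bTagLoop, hd] at h
      have := ih t h
      simp; omega

-- the outer 'for c in it' loop of B
def bGo : List Char → List Char
  | [] => []
  | c :: rest =>
    if c = '&' then
      match h : bEntLoop rest with
      | (name, some t) => bEntGet name ++ bGo t
      | (_, none) => []
    else if c = '<' then
      match h : bTagLoop rest with
      | some t => bGo t
      | none => []
    else c :: bGo rest
termination_by l => l.length
decreasing_by
  · have := bEntLoop_len rest name t h; simp; omega
  · have := bTagLoop_len rest t h; simp; omega
  · simp

def nohtml_alt (html : String) : String := String.mk (bGo html.toList)

-- ===== PRECONDITION & SPEC =====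
def Spec_nohtml (html : String) (out : String) : Prop := out = nohtml_alt html
instance (html : String) (out : String) : Decidable (Spec_nohtml html out) := by unfold Spec_nohtml; infer_instance

-- ===== CLAIM (what is proved, stated in full; the proofs are below) =====
def Claim_equal_nohtml : Prop := ∀ (html : String), Dom_nohtml html → Spec_nohtml html (nohtml html)

-- ===== LEMMAS AND PROOFS =====

theorem entGet_eq (n : List Char) : bEntGet n = aEntGet n := rfl

-- tag mode: A's fold skips to just after the first '>', exactly what bTagLoop finds
theorem tag_phase (l : List Char) (res : List (List Char)) (ent : List Char) :
    (l.foldl aStep (false, true, res, ent)).2.2.1 =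
      (match bTagLoop l with
       | some t => (t.foldl aStep (false, false, res, ent)).2.2.1
       | none => res) := by
  induction l with
  | nil => simp [bTagLoop]
  | cons c rest ih =>
    by_cases hc : c = '>'
    · simp [List.foldl_cons, aStep, bTagLoop, hc]
    · simp [List.foldl_cons, aStep, bTagLoop, hc, ih]

-- entity mode: A's fold collects up to the first ';' into ent, exactly what bEntLoop collects
theorem ent_phase (l : List Char) (res : List (List Char)) (ent : List Char) :
    (l.foldl aStep (true, false, res, ent)).2.2.1 =
      (match bEntLoop l with
       | (name, some t) => (t.foldl aStep (false, false, res ++ [aEntGet (ent ++ name)], [])).2.2.1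
       | (_, none) => res) := by
  induction l generalizing ent with
  | nil => simp [bEntLoop]
  | cons c rest ih =>
    by_cases hc : c = ';'
    · simp [List.foldl_cons, aStep, bEntLoop, hc]
    · rcases hb : bEntLoop rest with ⟨name, t⟩
      cases t with
      | some t' =>
        simp [List.foldl_cons, aStep, bEntLoop, hc, hb, ih (ent ++ [c])]
      | none =>
        simp [List.foldl_cons, aStep, bEntLoop, hc, hb, ih (ent ++ [c])]

-- neutral mode: A's fold from a neutral state produces res ++ bGo l
theorem main_phase : ∀ (n : Nat) (l : List Char) (res : List (List Char)), l.length ≤ n →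
    ((l.foldl aStep (false, false, res, [])).2.2.1).flatten = res.flatten ++ bGo l := by
  intro n
  induction n with
  | zero =>
    intro l res h
    have : l = [] := List.eq_nil_of_length_eq_zero (by omega)
    subst this; simp [bGo]
  | succ n ih =>
    intro l res h
    cases l with
    | nil => simp [bGo]
    | cons c rest =>
      simp at h
      by_cases hamp : c = '&'
      · subst hamp
        rw [List.foldl_cons]
        have hstep : aStep (false, false, res, []) '&' = (true, false, res, []) := rfl
        rcases hb : bEntLoop rest with ⟨name, t⟩
        cases t with
        | some t' =>
          have hlen := bEntLoop_len rest name t' hb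
          rw [hstep, ent_phase, hb]
          simp only [List.nil_append]
          rw [ih t' (res ++ [aEntGet name]) (by omega), bGo]
          simp [hb, entGet_eq]
          split <;> simp_all [entGet_eq]
        | none =>
          rw [hstep, ent_phase, hb, bGo]
          simp [hb]
          split <;> simp_all
      · by_cases hlt : c = '<'
        · subst hlt
          rw [List.foldl_cons]
          have hstep : aStep (false, false, res, []) '<' = (false, true, res, []) := rfl
          rcases hb : bTagLoop rest with _ | t'
          · rw [hstep, tag_phase, hb, bGo]
            simp [hb]
            split <;> simp_all
          · have hlen := bTagLoop_len rest t' hb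
            rw [hstep, tag_phase, hb]
            rw [ih t' res (by omega), bGo]
            simp [hb]
            split <;> simp_all
        · rw [List.foldl_cons]
          have hstep : aStep (false, false, res, []) c = (false, false, res ++ [[c]], []) := by
            simp [aStep, hamp, hlt]
          rw [hstep, ih rest (res ++ [[c]]) (by omega), bGo]
          simp [hamp, hlt]

-- ===== VERDICT (by name: the statement is the Claim_ definition above) =====
theorem nohtml_spec : Claim_equal_nohtml := by
  intro html _
  unfold Spec_nohtml nohtml nohtml_alt
  rw [main_phase html.toList.length html.toList [] (le_refl _)]
  simp
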